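-- pv_equiv track=rewrite | github.com/michaelkimm/Algorithm-problem-solving-thought-process-re-record | Python/2023DevMatch/prob3.py | solution
-- ===== SOURCE A (Python) =====
-- from itertools import product
--
-- def solution(rules, m):
--
--     cases = list(product(range(len(rules)), repeat = m))
--
--     answer = [0 for _ in range(len(rules))]
--     for case in cases:
--         startNum = case[0]
--         curNum = startNum
--         for i in range(1, len(case)):
--             materialNum = case[i]
--             curNum = rules[curNum][materialNum]
--
--         answer[curNum] += 1
--
--     for i in range(len(answer)):
--         answer[i] = answer[i] % 10007
--     return answer
-- ===== SOURCE B (Python) =====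
-- def solution(rules, m):
--     n = len(rules)
--     v = [1] * n
--     for _ in range(m - 1):
--         w = [0] * n
--         for j in range(n):
--             c = v[j]
--             row = rules[j]
--             for k in range(n):
--                 w[row[k]] += c
--         v = w
--     return [x % 10007 for x in v]
-- ===== Notes on version B (the rewrite author's own statement) =====
-- stated objective: faster
-- what changed: A enumerates all len(rules)^m transition sequences and simulates each; B propagates a state-count vector through m-1 DP steps (w[rules[j][k]] += v[j]), turning O(m*n^m) into O(m*n^2).
import Mathlib
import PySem

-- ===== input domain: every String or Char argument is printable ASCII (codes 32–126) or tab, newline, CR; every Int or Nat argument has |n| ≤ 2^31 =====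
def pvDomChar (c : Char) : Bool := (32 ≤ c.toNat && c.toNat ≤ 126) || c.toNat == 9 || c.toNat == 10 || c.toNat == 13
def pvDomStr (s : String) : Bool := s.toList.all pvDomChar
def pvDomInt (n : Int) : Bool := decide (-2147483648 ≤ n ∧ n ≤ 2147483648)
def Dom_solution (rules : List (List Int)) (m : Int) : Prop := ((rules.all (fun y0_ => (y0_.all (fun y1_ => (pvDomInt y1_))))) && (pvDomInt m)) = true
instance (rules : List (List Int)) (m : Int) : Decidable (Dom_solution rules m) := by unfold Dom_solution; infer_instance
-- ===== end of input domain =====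

-- B replaces A's enumeration of all n^m transition sequences by a step-wise DP on a
-- state-count vector (objective: faster, asymptotically).


-- ===== PORT A =====
-- itertools.product(range(n), repeat=m): all length-m tuples over range(n), lexicographic order
def pvProd (n m : Nat) : List (List Int) :=
  match m with
  | 0 => [[]]
  | Nat.succ k => (List.range n).flatMap (fun (a : Nat) => (pvProd n k).map (fun t => ((a : Int) :: t)))

-- rules[curNum][materialNum]; negative indices wrap as in Python, the `.getD 0` arm is
-- Python's IndexError (those inputs are excluded by Pre_solution)
def pvStepA (rules : List (List Int)) (cur k : Int) : Int :=
  ((PySem.List.pyGet? rules cur).bind (fun row => PySem.List.pyGet? row k)).getD 0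

-- A's inner loop: curNum = case[0]; for i in range(1, len(case)): curNum = rules[curNum][case[i]]
def pvFinal (rules : List (List Int)) (c : List Int) : Int :=
  (c.drop 1).foldl (pvStepA rules) (PySem.List.pyGetD c 0 0)

-- answer[curNum] += 1 (negative index wraps as in Python)
def pvBump (ans : List Int) (i : Int) : List Int :=
  PySem.List.pySetD ans i (PySem.List.pyGetD ans i 0 + 1)

def solution (rules : List (List Int)) (m : Int) : List Int :=
  ((pvProd rules.length m.toNat).foldl (fun ans c => pvBump ans (pvFinal rules c))
      (List.replicate rules.length 0)).map (fun x => PySem.Int.mod x 10007)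

-- ===== PORT B =====
-- w[row[k]] += c (negative index wraps as in Python)
def pvBumpBy (w : List Int) (t c : Int) : List Int :=
  PySem.List.pySetD w t (PySem.List.pyGetD w t 0 + c)

-- one DP pass of B: distribute each count v[j] along the transitions rules[j][k]
def pvStepB (rules : List (List Int)) (v : List Int) : List Int :=
  (List.range rules.length).foldl
    (fun w j =>
      (List.range rules.length).foldl
        (fun w k => pvBumpBy w ((rules.getD j []).getD k 0) (v.getD j 0)) w)
    (List.replicate rules.length 0)

def solution_alt (rules : List (List Int)) (m : Int) : List Int :=
  ((List.range (m - 1).toNat).foldl (fun v _ => pvStepB rules v)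
      (List.replicate rules.length 1)).map (fun x => PySem.Int.mod x 10007)

-- ===== PRECONDITION & SPEC =====
-- Pre_ excludes exactly the inputs where Python A raises: m ≥ 1 (m = 0 hits case[0], an
-- IndexError; m < 0 is a ValueError in product), and — unless m = 1, where the table is
-- never consulted — every row long enough to be indexed by every state and every usable
-- table entry a valid (possibly negative) index into rules.
def Pre_solution (rules : List (List Int)) (m : Int) : Prop :=
  1 ≤ m ∧ (m = 1 ∨ ∀ row ∈ rules, rules.length ≤ row.length ∧
    ∀ x ∈ row.take rules.length, -(rules.length : Int) ≤ x ∧ x < rules.length)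
instance (rules : List (List Int)) (m : Int) : Decidable (Pre_solution rules m) := by
  unfold Pre_solution; infer_instance
def pvWitness_solution : List (List Int) × Int := ([[1, 0], [0, -2]], 3)

def Spec_solution (rules : List (List Int)) (m : Int) (out : List Int) : Prop := out = solution_alt rules m
instance (rules : List (List Int)) (m : Int) (out : List Int) : Decidable (Spec_solution rules m out) := by unfold Spec_solution; infer_instance

-- ===== CLAIM (what is proved, stated in full; the proofs are below) =====
def Claim_equal_solution : Prop := ∀ (rules : List (List Int)) (m : Int), Dom_solution rules m → Pre_solution rules m → Spec_solution rules m (solution rules m)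

-- ===== LEMMAS AND PROOFS =====

-- resolved index of Python index i into a list of length n (defined when -n ≤ i < n)
def pvRes (n : Nat) (i : Int) : Nat := if 0 ≤ i then i.toNat else n - (-i).toNat

def pvInR (n : Nat) (i : Int) : Prop := -(n : Int) ≤ i ∧ i < n

-- the rules-table part of Pre_solution
def pvGood (rules : List (List Int)) : Prop :=
  ∀ row ∈ rules, rules.length ≤ row.length ∧
    ∀ x ∈ row.take rules.length, pvInR rules.length x

-- table entry rules[j][k] as B reads it (j, k already resolved)
def pvTgt (rules : List (List Int)) (j k : Nat) : Int := (rules.getD j []).getD k 0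

-- number of symbols k < n with transition j →k→ i
def pvTC (rules : List (List Int)) (j i : Nat) : Nat :=
  (List.range rules.length).countP (fun k => pvRes rules.length (pvTgt rules j k) = i)

-- number of length-L sequences whose final state resolves to j
def pvCnt (rules : List (List Int)) (L : Nat) (j : Nat) : Int :=
  ((pvProd rules.length L).countP (fun t => pvRes rules.length (pvFinal rules t) = j) : Int)

theorem pvRes_lt {n : Nat} {i : Int} (h : pvInR n i) : pvRes n i < n := by
  rcases h with ⟨h1, h2⟩
  unfold pvRes; split_ifs <;> omega

theorem pyIdx_eq {n : Nat} {i : Int} (h : pvInR n i) :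
    PySem.List.pyIdx? n i = some (pvRes n i) := by
  rcases h with ⟨h1, h2⟩
  simp only [PySem.List.pyIdx?, pvRes]
  split_ifs <;> simp_all

theorem pyGetD_inr {xs : List Int} {i : Int} (h : pvInR xs.length i) (d : Int) :
    PySem.List.pyGetD xs i d = xs.getD (pvRes xs.length i) d := by
  simp [PySem.List.pyGetD, PySem.List.pyGet?, pyIdx_eq h, List.getD,
    List.getElem?_eq_getElem (pvRes_lt h)]

theorem pySetD_inr {xs : List Int} {i : Int} (h : pvInR xs.length i) (v : Int) :
    PySem.List.pySetD xs i v = xs.set (pvRes xs.length i) v := by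
  simp [PySem.List.pySetD, PySem.List.pySet?, pyIdx_eq h]

theorem pvBump_eq (a : List Int) (i : Int) : pvBump a i = pvBumpBy a i 1 := rfl

theorem length_bumpBy (w : List Int) (t c : Int) : (pvBumpBy w t c).length = w.length := by
  simp only [pvBumpBy, PySem.List.pySetD, PySem.List.pySet?]
  cases PySem.List.pyIdx? w.length t <;> simp

theorem getD_bumpBy {w : List Int} {t : Int} (h : pvInR w.length t) (c : Int) {j : Nat}
    (hj : j < w.length) :
    (pvBumpBy w t c).getD j 0 = w.getD j 0 + (if pvRes w.length t = j then c else 0) := by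
  unfold pvBumpBy
  rw [pySetD_inr h, pyGetD_inr h]
  have hres := pvRes_lt h
  by_cases hij : pvRes w.length t = j
  · subst hij
    simp [List.getD_eq_getElem?_getD, hres]
  · simp [List.getD_eq_getElem?_getD, hij]

-- a fold of pvBumpBy over in-range targets f k, entrywise
theorem foldl_bumpBy_getD (ks : List Nat) (f : Nat → Int) (c : Int) (w : List Int)
    (hts : ∀ k ∈ ks, pvInR w.length (f k)) {j : Nat} (hj : j < w.length) :
    ((ks.foldl (fun w k => pvBumpBy w (f k) c) w).getD j 0)
      = w.getD j 0 + c * (ks.countP (fun k => pvRes w.length (f k) = j) : Int) := by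
  induction ks generalizing w with
  | nil => simp
  | cons k ks ih =>
    have hk := hts k (by simp)
    rw [List.foldl_cons,
      ih (pvBumpBy w (f k) c)
        (by intro x hx; rw [length_bumpBy]; exact hts x (List.mem_cons_of_mem _ hx))
        (by rw [length_bumpBy]; omega)]
    simp only [length_bumpBy]
    rw [getD_bumpBy hk c hj, List.countP_cons]
    by_cases hc : pvRes w.length (f k) = j <;> simp [hc] <;> push_cast <;> ring

theorem length_foldl_bumpBy (ks : List Nat) (f : Nat → Int) (c : Int) (w : List Int) :
    (ks.foldl (fun w k => pvBumpBy w (f k) c) w).length = w.length := by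
  induction ks generalizing w with
  | nil => rfl
  | cons k ks ih => rw [List.foldl_cons, ih, length_bumpBy]

theorem tgt_inr {rules : List (List Int)} (hG : pvGood rules) {j k : Nat}
    (hj : j < rules.length) (hk : k < rules.length) :
    pvInR rules.length (pvTgt rules j k) := by
  have hrow : rules.getD j [] ∈ rules := by
    rw [List.getD_eq_getElem?_getD, List.getElem?_eq_getElem hj]
    exact List.getElem_mem hj
  obtain ⟨hlen, hall⟩ := hG _ hrow
  have hk' : k < (rules.getD j []).length := lt_of_lt_of_le hk hlen
  have htake : k < ((rules.getD j []).take rules.length).length := by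
    rw [List.length_take]; omega
  have hmem : ((rules.getD j []).take rules.length)[k] ∈ (rules.getD j []).take rules.length :=
    List.getElem_mem htake
  rw [List.getElem_take] at hmem
  have heq : pvTgt rules j k = (rules.getD j [])[k] := List.getD_eq_getElem _ _ hk'
  rw [heq]
  exact hall _ hmem

-- ===== A-side characterisation =====

theorem final_cons (rules : List (List Int)) (a : Int) (t : List Int) :
    pvFinal rules (a :: t) = t.foldl (pvStepA rules) a := by
  simp [pvFinal, PySem.List.pyGetD, PySem.List.pyGet?, PySem.List.pyIdx?]

theorem stepA_eq {rules : List (List Int)} (hG : pvGood rules) {cur k : Int}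
    (hcur : pvInR rules.length cur) (hk0 : 0 ≤ k) (hk : k < rules.length) :
    pvStepA rules cur k = pvTgt rules (pvRes rules.length cur) k.toNat := by
  have hres := pvRes_lt hcur
  have hrow : PySem.List.pyGet? rules cur = some (rules.getD (pvRes rules.length cur) []) := by
    simp [PySem.List.pyGet?, pyIdx_eq hcur, List.getD, List.getElem?_eq_getElem hres]
  have hrowmem : rules.getD (pvRes rules.length cur) [] ∈ rules := by
    rw [List.getD_eq_getElem?_getD, List.getElem?_eq_getElem hres]
    exact List.getElem_mem hres
  obtain ⟨hlen, -⟩ := hG _ hrowmem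
  have hkr : pvInR (rules.getD (pvRes rules.length cur) []).length k := by
    constructor <;> omega
  have hresk : pvRes (rules.getD (pvRes rules.length cur) []).length k = k.toNat := by
    simp [pvRes, hk0]
  have hk2 : k.toNat < (rules.getD (pvRes rules.length cur) []).length := by omega
  have hget : PySem.List.pyGet? (rules.getD (pvRes rules.length cur) []) k
      = some ((rules.getD (pvRes rules.length cur) [])[k.toNat]'hk2) := by
    unfold PySem.List.pyGet?
    rw [pyIdx_eq hkr, hresk]
    exact List.getElem?_eq_getElem hk2
  unfold pvStepA
  rw [hrow]
  show (PySem.List.pyGet? (rules.getD (pvRes rules.length cur) []) k).getD 0 = _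
  rw [hget]
  show (rules.getD (pvRes rules.length cur) [])[k.toNat]'hk2 = _
  rw [show pvTgt rules (pvRes rules.length cur) k.toNat
      = (rules.getD (pvRes rules.length cur) []).getD k.toNat 0 from rfl,
    List.getD_eq_getElem _ 0 hk2]

theorem stepA_inr {rules : List (List Int)} (hG : pvGood rules) {cur k : Int}
    (hcur : pvInR rules.length cur) (hk0 : 0 ≤ k) (hk : k < rules.length) :
    pvInR rules.length (pvStepA rules cur k) := by
  rw [stepA_eq hG hcur hk0 hk]
  exact tgt_inr hG (pvRes_lt hcur) (by omega)

theorem mem_pvProd {n L : Nat} {t : List Int} (h : t ∈ pvProd n L) :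
    t.length = L ∧ ∀ x ∈ t, 0 ≤ x ∧ x < n := by
  induction L generalizing t with
  | zero => simp [pvProd] at h; simp [h]
  | succ k ih =>
    simp only [pvProd, List.mem_flatMap, List.mem_map] at h
    obtain ⟨a, ha, t', ht', rfl⟩ := h
    rw [List.mem_range] at ha
    obtain ⟨hl, hall⟩ := ih ht'
    refine ⟨by simp [hl], ?_⟩
    intro x hx
    rcases List.mem_cons.mp hx with rfl | hx
    · exact ⟨Int.natCast_nonneg a, by exact_mod_cast ha⟩
    · exact hall x hx

theorem foldl_stepA_inr {rules : List (List Int)} (hG : pvGood rules) {cur : Int}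
    (hcur : pvInR rules.length cur) {ts : List Int} (hts : ∀ x ∈ ts, 0 ≤ x ∧ x < rules.length) :
    pvInR rules.length (ts.foldl (pvStepA rules) cur) := by
  induction ts generalizing cur with
  | nil => exact hcur
  | cons x ts ih =>
    have hx := hts x (by simp)
    exact ih (stepA_inr hG hcur hx.1 hx.2) (fun y hy => hts y (List.mem_cons_of_mem _ hy))

theorem final_inr {rules : List (List Int)} (hG : pvGood rules) {L : Nat} {t : List Int}
    (ht : t ∈ pvProd rules.length (L + 1)) : pvInR rules.length (pvFinal rules t) := by
  obtain ⟨hl, hall⟩ := mem_pvProd ht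
  cases t with
  | nil => simp at hl
  | cons a t' =>
    rw [final_cons]
    have ha := hall a (by simp)
    exact foldl_stepA_inr hG ⟨by omega, ha.2⟩ (fun y hy => hall y (List.mem_cons_of_mem _ hy))

theorem foldl_bump_getD {rules : List (List Int)} (cs : List (List Int)) (ans : List Int)
    (hfin : ∀ t ∈ cs, pvInR ans.length (pvFinal rules t)) {j : Nat} (hj : j < ans.length) :
    ((cs.foldl (fun a t => pvBump a (pvFinal rules t)) ans).getD j 0)
      = ans.getD j 0 + (cs.countP (fun t => pvRes ans.length (pvFinal rules t) = j) : Int) := by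
  induction cs generalizing ans with
  | nil => simp
  | cons c cs ih =>
    have hc := hfin c (by simp)
    rw [List.foldl_cons, pvBump_eq,
      ih (pvBumpBy ans (pvFinal rules c) 1)
        (by intro x hx; rw [length_bumpBy]; exact hfin x (List.mem_cons_of_mem _ hx))
        (by rw [length_bumpBy]; omega)]
    simp only [length_bumpBy]
    rw [getD_bumpBy hc 1 hj, List.countP_cons]
    by_cases hcc : pvRes ans.length (pvFinal rules c) = j <;> simp [hcc] <;> push_cast <;> ring

theorem length_foldl_bump (rules : List (List Int)) (cs : List (List Int)) (ans : List Int) :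
    (cs.foldl (fun a t => pvBump a (pvFinal rules t)) ans).length = ans.length := by
  induction cs generalizing ans with
  | nil => rfl
  | cons c cs ih =>
    rw [List.foldl_cons, ih, pvBump_eq, length_bumpBy]

-- ===== counting recurrence =====

theorem flatMap_perm_of_forall {α β : Type} (l : List α) (f g : α → List β)
    (h : ∀ a ∈ l, (f a).Perm (g a)) : (l.flatMap f).Perm (l.flatMap g) := by
  induction l with
  | nil => rfl
  | cons a l ih =>
    simp only [List.flatMap_cons]
    exact (h a (by simp)).append (ih (fun x hx => h x (List.mem_cons_of_mem _ hx)))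

theorem flatMap_sing {α β : Type} (l : List α) (f : α → β) :
    l.flatMap (fun x => [f x]) = l.map f := by
  induction l with
  | nil => rfl
  | cons x l ih => simp [ih]

theorem prod_succ_perm (n L : Nat) :
    (pvProd n (L + 1)).Perm
      ((pvProd n L).flatMap (fun t => (List.range n).map (fun (b : Nat) => t ++ [(b : Int)]))) := by
  induction L with
  | zero =>
    have h1 : pvProd n 1 = (List.range n).map (fun (a : Nat) => [(a : Int)]) := by
      show (List.range n).flatMap (fun (a : Nat) => (pvProd n 0).map (fun t => ((a : Int) :: t))) = _
      rw [show (fun (a : Nat) => (pvProd n 0).map (fun t => ((a : Int) :: t)))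
          = (fun (a : Nat) => [[(a : Int)]]) from rfl]
      exact flatMap_sing _ _
    rw [h1]
    have h2 : (pvProd n 0).flatMap
        (fun t => (List.range n).map (fun (b : Nat) => t ++ [(b : Int)]))
        = (List.range n).map (fun (b : Nat) => [(b : Int)]) := by
      show ([[]] : List (List Int)).flatMap _ = _
      simp
    rw [h2]
  | succ k ih =>
    have step1 : (pvProd n (k + 2)).Perm
        ((List.range n).flatMap (fun (a : Nat) =>
          ((pvProd n k).flatMap (fun t => (List.range n).map (fun (b : Nat) => t ++ [(b : Int)]))).map
            (fun t => ((a : Int) :: t)))) :=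
      flatMap_perm_of_forall _ _ _ (fun a _ => ih.map _)
    refine step1.trans ?_
    have heq : ((List.range n).flatMap (fun (a : Nat) =>
          ((pvProd n k).flatMap (fun t => (List.range n).map (fun (b : Nat) => t ++ [(b : Int)]))).map
            (fun t => ((a : Int) :: t))))
        = ((pvProd n (k + 1)).flatMap
            (fun t => (List.range n).map (fun (b : Nat) => t ++ [(b : Int)]))) := by
      show _ = ((List.range n).flatMap
        (fun (a : Nat) => (pvProd n k).map (fun t => ((a : Int) :: t)))).flatMap _
      simp [List.map_flatMap, List.flatMap_map, List.flatMap_assoc, Function.comp_def]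
    rw [heq]

theorem sum_map_add_nat {α : Type} (l : List α) (f g : α → Nat) :
    (l.map (fun x => f x + g x)).sum = (l.map f).sum + (l.map g).sum := by
  induction l with
  | nil => rfl
  | cons x l ih => simp only [List.map_cons, List.sum_cons, ih]; ring

theorem sum_delta (n j0 : Nat) (h : j0 < n) (g : Nat → Nat) :
    ((List.range n).map (fun j => if j0 = j then g j else 0)).sum = g j0 := by
  induction n with
  | zero => omega
  | succ k ih =>
    rw [List.range_succ, List.map_append, List.sum_append]
    by_cases hj : j0 = k
    · subst hj
      have hz : ((List.range j0).map (fun j => if j0 = j then g j else 0)).sum = 0 := by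
        apply List.sum_eq_zero
        intro x hx
        simp only [List.mem_map, List.mem_range] at hx
        obtain ⟨j, hjlt, rfl⟩ := hx
        have hne : j0 ≠ j := by omega
        simp [hne]
      simp [hz]
    · have hlt : j0 < k := by omega
      simp [ih hlt, hj]

theorem sum_group {α : Type} (n : Nat) (l : List α) (h : α → Nat) (g : Nat → Nat)
    (hh : ∀ x ∈ l, h x < n) :
    (l.map (fun x => g (h x))).sum
      = ((List.range n).map (fun j => (l.countP (fun x => h x = j)) * g j)).sum := by
  induction l with
  | nil => simp
  | cons x l ih =>
    have hx := hh x (by simp)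
    rw [List.map_cons, List.sum_cons, ih (fun y hy => hh y (List.mem_cons_of_mem _ hy))]
    have hmaps : ((List.range n).map (fun j => ((x :: l).countP (fun y => h y = j)) * g j))
        = ((List.range n).map (fun j =>
            (l.countP (fun y => h y = j)) * g j + (if h x = j then g j else 0))) := by
      apply List.map_congr_left
      intro j _
      rw [List.countP_cons]
      by_cases hc : h x = j <;> simp [hc] <;> ring
    rw [hmaps, sum_map_add_nat, sum_delta n (h x) hx g]
    ring

theorem cnt_succ {rules : List (List Int)} (hG : pvGood rules) {i : Nat}
    (hi : i < rules.length) (L : Nat) :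
    pvCnt rules (L + 2) i
      = ((List.range rules.length).map
          (fun j => pvCnt rules (L + 1) j * (pvTC rules j i : Int))).sum := by
  have hperm := prod_succ_perm rules.length (L + 1)
  unfold pvCnt
  rw [List.Perm.countP_eq _ hperm, List.countP_flatMap]
  have hpt : ∀ t ∈ pvProd rules.length (L + 1),
      ((List.countP (fun t' => pvRes rules.length (pvFinal rules t') = i)) ∘
        (fun t => (List.range rules.length).map (fun (b : Nat) => t ++ [(b : Int)]))) t
      = pvTC rules (pvRes rules.length (pvFinal rules t)) i := by
    intro t ht
    have hfin := final_inr hG ht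
    obtain ⟨hl, hall⟩ := mem_pvProd ht
    simp only [Function.comp_apply, List.countP_map]
    unfold pvTC
    apply List.countP_congr
    intro b hb
    rw [List.mem_range] at hb
    have hfb : pvFinal rules (t ++ [(b : Int)]) = pvStepA rules (pvFinal rules t) (b : Int) := by
      cases t with
      | nil => simp at hl
      | cons a t' =>
        rw [List.cons_append, final_cons, final_cons, List.foldl_append]
        simp
    simp only [Function.comp_apply, decide_eq_true_eq]
    rw [hfb, stepA_eq hG hfin (Int.natCast_nonneg b) (by exact_mod_cast hb), Int.toNat_natCast]
  rw [List.map_congr_left hpt]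
  rw [sum_group rules.length (pvProd rules.length (L + 1))
    (fun t => pvRes rules.length (pvFinal rules t)) (fun j => pvTC rules j i)
    (fun t ht => pvRes_lt (final_inr hG ht))]
  rw [Nat.cast_list_sum, List.map_map]
  apply congrArg List.sum
  apply List.map_congr_left
  intro j _
  simp only [Function.comp_apply]
  push_cast
  ring

-- ===== B-side characterisation =====

theorem length_inner (rules : List (List Int)) (j : Nat) (v w : List Int) :
    ((List.range rules.length).foldl
      (fun w k => pvBumpBy w ((rules.getD j []).getD k 0) (v.getD j 0)) w).length = w.length :=
  length_foldl_bumpBy (List.range rules.length) (fun k => (rules.getD j []).getD k 0) _ w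

theorem inner_getD {rules : List (List Int)} (hG : pvGood rules) (v : List Int) {j : Nat}
    (hj : j < rules.length) (w : List Int) (hw : w.length = rules.length) {i : Nat}
    (hi : i < rules.length) :
    ((List.range rules.length).foldl
        (fun w k => pvBumpBy w ((rules.getD j []).getD k 0) (v.getD j 0)) w).getD i 0
      = w.getD i 0 + v.getD j 0 * (pvTC rules j i : Int) := by
  rw [foldl_bumpBy_getD (List.range rules.length) (fun k => (rules.getD j []).getD k 0) _ w
      (by intro k hk
          rw [List.mem_range] at hk
          exact hw ▸ tgt_inr hG hj hk)
      (by omega)]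
  rw [hw]
  rfl

theorem outer_getD {rules : List (List Int)} (hG : pvGood rules) (v : List Int)
    (js : List Nat) (hjs : ∀ j ∈ js, j < rules.length) (w : List Int)
    (hw : w.length = rules.length) {i : Nat} (hi : i < rules.length) :
    ((js.foldl (fun w j =>
        (List.range rules.length).foldl
          (fun w k => pvBumpBy w ((rules.getD j []).getD k 0) (v.getD j 0)) w) w).getD i 0)
      = w.getD i 0 + ((js.map (fun j => v.getD j 0 * (pvTC rules j i : Int))).sum) := by
  induction js generalizing w with
  | nil => simp
  | cons j js ih =>
    have hj := hjs j (by simp)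
    rw [List.foldl_cons,
      ih (fun x hx => hjs x (List.mem_cons_of_mem _ hx)) _ (by rw [length_inner, hw]),
      inner_getD hG v hj w hw hi, List.map_cons, List.sum_cons]
    ring

theorem length_outer (rules : List (List Int)) (v : List Int) (js : List Nat) (w : List Int) :
    ((js.foldl (fun w j =>
        (List.range rules.length).foldl
          (fun w k => pvBumpBy w ((rules.getD j []).getD k 0) (v.getD j 0)) w) w).length)
      = w.length := by
  induction js generalizing w with
  | nil => rfl
  | cons j js ih => rw [List.foldl_cons, ih, length_inner]

theorem length_stepB (rules : List (List Int)) (v : List Int) :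
    (pvStepB rules v).length = rules.length := by
  unfold pvStepB
  rw [length_outer]
  simp

theorem stepB_getD {rules : List (List Int)} (hG : pvGood rules) (v : List Int)
    {i : Nat} (hi : i < rules.length) :
    (pvStepB rules v).getD i 0
      = ((List.range rules.length).map (fun j => v.getD j 0 * (pvTC rules j i : Int))).sum := by
  unfold pvStepB
  rw [outer_getD hG v _ (fun j hj => List.mem_range.mp hj) _ (by simp) hi]
  simp

theorem cnt_one {rules : List (List Int)} {j : Nat} (hj : j < rules.length) :
    pvCnt rules 1 j = 1 := by
  unfold pvCnt
  have h1 : pvProd rules.length 1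
      = (List.range rules.length).map (fun (a : Nat) => [(a : Int)]) := by
    show (List.range rules.length).flatMap
      (fun (a : Nat) => (pvProd rules.length 0).map (fun t => ((a : Int) :: t))) = _
    rw [show (fun (a : Nat) => (pvProd rules.length 0).map (fun t => ((a : Int) :: t)))
        = (fun (a : Nat) => [[(a : Int)]]) from rfl]
    exact flatMap_sing _ _
  rw [h1, List.countP_map]
  have hcong : ∀ a ∈ List.range rules.length,
      ((fun t => decide (pvRes rules.length (pvFinal rules t) = j)) ∘
        (fun (a : Nat) => [(a : Int)])) a = (a == j) := by
    intro a ha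
    rw [List.mem_range] at ha
    have hfa : pvFinal rules [(a : Int)] = (a : Int) := by
      rw [show ([(a : Int)] : List Int) = ((a : Int) :: ([] : List Int)) from rfl, final_cons]
      rfl
    simp only [Function.comp_apply]
    rw [hfa, show pvRes rules.length ((a : Nat) : Int) = a from by simp [pvRes]]
    rw [Bool.eq_iff_iff]
    simp
  rw [List.countP_congr (fun a ha => by rw [hcong a ha])]
  have hcnt : List.count j (List.range rules.length) = 1 := by
    rw [List.count_range, if_pos hj]
  show ((List.count j (List.range rules.length) : Nat) : Int) = 1
  rw [hcnt]
  rfl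

theorem final_inr_one {rules : List (List Int)} {t : List Int}
    (ht : t ∈ pvProd rules.length 1) : pvInR rules.length (pvFinal rules t) := by
  obtain ⟨hl, hall⟩ := mem_pvProd ht
  cases t with
  | nil => simp at hl
  | cons a t' =>
    have ht' : t' = [] := by cases t' <;> simp_all
    subst ht'
    rw [final_cons, List.foldl_nil]
    have ha := hall a (by simp)
    exact ⟨by omega, ha.2⟩

theorem repl_eq (rules : List (List Int)) :
    List.replicate rules.length (1 : Int)
      = (List.range rules.length).map (fun j => pvCnt rules 1 j) := by
  apply List.ext_getElem (by simp)
  intro i h1 h2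
  simp only [List.getElem_replicate, List.getElem_map, List.getElem_range]
  rw [cnt_one (by simpa using h2)]

theorem answer_eq {rules : List (List Int)} {M : Nat}
    (hfin : ∀ t ∈ pvProd rules.length M, pvInR rules.length (pvFinal rules t)) :
    (pvProd rules.length M).foldl (fun ans c => pvBump ans (pvFinal rules c))
        (List.replicate rules.length 0)
      = (List.range rules.length).map (fun j => pvCnt rules M j) := by
  apply List.ext_getElem (by simp [length_foldl_bump])
  intro j h1 h2
  have hj : j < rules.length := by simpa using h2
  rw [(List.getD_eq_getElem _ 0 h1).symm, (List.getD_eq_getElem _ 0 h2).symm]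
  rw [foldl_bump_getD _ _ (by
      intro t ht
      rw [List.length_replicate]
      exact hfin t ht) (by simpa using hj)]
  simp only [List.length_replicate]
  have hz : (List.replicate rules.length (0 : Int)).getD j 0 = 0 := by simp
  have hmap : ((List.range rules.length).map (fun j => pvCnt rules M j)).getD j 0
      = pvCnt rules M j := by
    rw [List.getD_eq_getElem _ 0 (by simpa using hj)]
    simp
  rw [hz, hmap, pvCnt]
  ring

theorem dp_invariant {rules : List (List Int)} (hG : pvGood rules) (s : Nat) :
    (List.range s).foldl (fun v _ => pvStepB rules v) (List.replicate rules.length 1)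
      = (List.range rules.length).map (fun j => pvCnt rules (s + 1) j) := by
  induction s with
  | zero =>
    simp only [List.range_zero, List.foldl_nil]
    exact repl_eq rules
  | succ s ih =>
    rw [List.range_succ, List.foldl_append, ih, List.foldl_cons, List.foldl_nil]
    apply List.ext_getElem (by simp [length_stepB])
    intro i h1 h2
    have hi : i < rules.length := by
      have := length_stepB rules ((List.range rules.length).map (fun j => pvCnt rules (s + 1) j))
      omega
    have hgd : ∀ (l : List Int), i < l.length → ∀ (h : i < l.length), l[i] = l.getD i 0 :=
      fun l hl h => (List.getD_eq_getElem l 0 h).symm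
    rw [hgd _ h1 h1, hgd _ h2 h2, stepB_getD hG _ hi]
    have hmapD : ∀ j, j < rules.length →
        ((List.range rules.length).map (fun j => pvCnt rules (s + 1) j)).getD j 0
          = pvCnt rules (s + 1) j := by
      intro j hjn
      rw [List.getD_eq_getElem _ 0 (by simpa using hjn)]
      simp
    rw [List.map_congr_left (fun j hjm => by
      rw [hmapD j (List.mem_range.mp hjm)])]
    rw [← cnt_succ hG hi s]
    rw [List.getD_eq_getElem _ 0 (by simpa using hi)]
    simp

-- ===== VERDICT (by name: the statement is the Claim_ definition above) =====
theorem solution_spec : Claim_equal_solution := by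
  intro rules m _ hPre
  obtain ⟨hm, hmG⟩ := hPre
  unfold Spec_solution solution solution_alt
  congr 1
  rcases hmG with hm1 | hG'
  · subst hm1
    rw [show ((1 : Int)).toNat = 1 from rfl, show ((1 : Int) - 1).toNat = 0 from rfl]
    rw [answer_eq (fun t ht => final_inr_one ht)]
    simp only [List.range_zero, List.foldl_nil]
    exact (repl_eq rules).symm
  · have hG2 : pvGood rules := hG'
    have hmt : m.toNat = (m - 1).toNat + 1 := by omega
    rw [dp_invariant hG2 ((m - 1).toNat), ← hmt]
    apply answer_eq
    intro t ht
    rw [hmt] at ht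
    exact final_inr hG2 ht
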